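-- pv_equiv track=rewrite | github.com/Kal567/rental_crawler | corotos_onqueue.py | split_by_line_jump
-- ===== SOURCE A (Python) =====
-- def split_by_line_jump(array):
--     result = []
--     for item in array:
--         sub_items = item.split("\n")
--         for sub_item in sub_items:
--             if(sub_item != ''):
--                 result.append(sub_item)
--     return result
-- ===== SOURCE B (Python) =====
-- def split_by_line_jump(array):
--     joined = "\n".join(array)
--     return [piece for piece in joined.split("\n") if piece != '']
-- ===== Notes on version B (the rewrite author's own statement) =====
-- stated objective: alternative
-- what changed: B concatenates all items into one newline-joined string and splits it once, filtering empty pieces, instead of A's per-item split with a nested append loop.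
import Mathlib
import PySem

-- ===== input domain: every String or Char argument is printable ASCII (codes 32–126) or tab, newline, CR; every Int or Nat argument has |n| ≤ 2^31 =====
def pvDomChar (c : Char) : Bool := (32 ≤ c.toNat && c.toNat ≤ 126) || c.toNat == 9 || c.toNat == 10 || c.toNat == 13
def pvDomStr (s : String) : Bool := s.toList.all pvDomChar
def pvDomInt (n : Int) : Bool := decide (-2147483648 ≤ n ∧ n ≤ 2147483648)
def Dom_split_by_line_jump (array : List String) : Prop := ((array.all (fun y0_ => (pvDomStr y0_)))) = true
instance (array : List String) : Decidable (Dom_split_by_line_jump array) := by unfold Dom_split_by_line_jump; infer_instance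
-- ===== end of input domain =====

-- B joins all items into one newline-separated string and splits it once, filtering empty
-- pieces, instead of A's per-item split with a nested append loop (objective: alternative
-- single-pass decomposition; same asymptotic cost).

-- ===== PORT A =====
def split_by_line_jump (array : List String) : List String :=
  array.foldl
    (fun result item =>
      let sub_items := (PySem.Str.split? item "\n").getD []   -- sep "\n" ≠ "" so split? is always `some`
      sub_items.foldl
        (fun result sub_item => if sub_item ≠ "" then result ++ [sub_item] else result)
        result)
    []

-- ===== PORT B =====
def split_by_line_jump_alt (array : List String) : List String :=
  let joined := PySem.Str.join "\n" array
  ((PySem.Str.split? joined "\n").getD []).filter (fun piece => piece ≠ "")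

-- ===== PRECONDITION & SPEC =====
def Spec_split_by_line_jump (array : List String) (out : List String) : Prop := out = split_by_line_jump_alt array
instance (array : List String) (out : List String) : Decidable (Spec_split_by_line_jump array out) := by unfold Spec_split_by_line_jump; infer_instance

-- ===== CLAIM (what is proved, stated in full; the proofs are below) =====
def Claim_equal_split_by_line_jump : Prop := ∀ (array : List String), Dom_split_by_line_jump array → Spec_split_by_line_jump array (split_by_line_jump array)

-- ===== LEMMAS AND PROOFS =====

theorem modifyHead_id {α : Type} (l : List (List α)) : List.modifyHead (fun x => x) l = l := by
  cases l <;> simp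

-- PySem.Chars.splitOn with a single-character separator is Mathlib's List.splitOn.
theorem splitOn_go_spec (c : Char) (fuel : Nat) (l cur : List Char) (acc : List (List Char))
    (h : l.length < fuel) :
    PySem.Chars.splitOn.go [c] fuel l cur acc
      = acc.reverse ++ (List.splitOn c l).modifyHead (cur.reverse ++ ·) := by
  induction fuel generalizing l cur acc with
  | zero => omega
  | succ fuel ih =>
    cases l with
    | nil =>
        simp [PySem.Chars.splitOn.go, List.splitOn, List.splitOnP_nil]
    | cons x rest =>
        by_cases hx : c = x
        · subst hx
          have hpre : List.isPrefixOf [c] (c :: rest) = true := by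
            simp [List.isPrefixOf]
          simp only [PySem.Chars.splitOn.go, hpre, if_true]
          have hd : List.drop ([c] : List Char).length (c :: rest) = rest := rfl
          rw [hd, ih rest [] (cur.reverse :: acc) (by simpa using Nat.lt_of_succ_lt_succ h)]
          simp [List.splitOn, List.splitOnP_cons, modifyHead_id]
        · have hpre : List.isPrefixOf [c] (x :: rest) = false := by
            simp [List.isPrefixOf]; exact hx
          simp only [PySem.Chars.splitOn.go, hpre]
          rw [ih rest (x :: cur) acc (by simpa using Nat.lt_of_succ_lt_succ h)]
          have hne := List.splitOnP_ne_nil (fun a => a == c) rest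
          obtain ⟨hd2, tl2, heq⟩ := List.exists_cons_of_ne_nil hne
          simp [List.splitOn, List.splitOnP_cons, Ne.symm hx, heq]

theorem chars_splitOn_eq (c : Char) (cs : List Char) :
    PySem.Chars.splitOn cs [c] = List.splitOn c cs := by
  unfold PySem.Chars.splitOn
  rw [splitOn_go_spec c (cs.length + 1) cs [] [] (by omega)]
  obtain ⟨hd, tl, heq⟩ := List.exists_cons_of_ne_nil
    (by simpa [List.splitOn] using List.splitOnP_ne_nil (fun a => a == c) cs)
  simp [modifyHead_id]

theorem splitOnP_append_cons {α : Type} (p : α → Bool) (c : α) (hc : p c = true)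
    (xs ys : List α) :
    List.splitOnP p (xs ++ c :: ys) = List.splitOnP p xs ++ List.splitOnP p ys := by
  induction xs with
  | nil => simp [List.splitOnP_cons, hc, List.splitOnP_nil]
  | cons x xs ih =>
      by_cases hx : p x = true
      · simp [List.splitOnP_cons, hx, ih]
      · obtain ⟨hd, tl, heq⟩ := List.exists_cons_of_ne_nil (List.splitOnP_ne_nil p (xs ++ c :: ys))
        obtain ⟨hd2, tl2, heq2⟩ := List.exists_cons_of_ne_nil (List.splitOnP_ne_nil p xs)
        have hih : hd = hd2 ∧ tl = tl2 ++ List.splitOnP p ys := by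
          simpa [heq, heq2] using ih
        simp [List.splitOnP_cons, hx, heq, heq2, hih.1, hih.2]

-- splitting on c distributes over an occurrence of c
theorem splitOn_append_cons (c : Char) (xs ys : List Char) :
    List.splitOn c (xs ++ c :: ys) = List.splitOn c xs ++ List.splitOn c ys := by
  simpa [List.splitOn] using splitOnP_append_cons (fun a => a == c) c (by simp) xs ys

-- splitting the join on the join separator yields exactly the concatenation of the
-- per-item splits (for a nonempty list of items)
theorem splitOn_intercalate (c : Char) (L : List (List Char)) (h : L ≠ []) :
    List.splitOn c (List.intercalate [c] L) = L.flatMap (fun cs => List.splitOn c cs) := by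
  induction L with
  | nil => exact absurd rfl h
  | cons a t ih =>
      cases t with
      | nil => simp [List.intercalate]
      | cons b t' =>
          have hstep : List.intercalate [c] (a :: b :: t')
              = a ++ c :: List.intercalate [c] (b :: t') := by
            simp [List.intercalate]
          rw [hstep, splitOn_append_cons, ih (by simp)]
          simp

theorem inner_foldl_eq (sub : List String) (acc : List String) :
    sub.foldl (fun result sub_item => if sub_item ≠ "" then result ++ [sub_item] else result) acc
      = acc ++ sub.filter (fun s => s ≠ "") := by
  induction sub generalizing acc with
  | nil => simp
  | cons s t ih =>
      rw [List.foldl_cons, ih, List.filter_cons]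
      by_cases hs : s = ""
      · simp [hs]
      · simp [hs]

theorem outer_foldl_eq (array : List String) (acc : List String) :
    array.foldl
      (fun result item =>
        ((PySem.Str.split? item "\n").getD []).foldl
          (fun result sub_item => if sub_item ≠ "" then result ++ [sub_item] else result) result)
      acc
      = acc ++ array.flatMap (fun item => ((PySem.Str.split? item "\n").getD []).filter (fun s => s ≠ "")) := by
  induction array generalizing acc with
  | nil => simp
  | cons a t ih =>
      rw [List.foldl_cons, inner_foldl_eq, ih, List.flatMap_cons, List.append_assoc]

theorem filter_map_ofList (xs : List (List Char)) :
    (xs.map String.ofList).filter (fun s => s ≠ "")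
      = (xs.filter (fun cs => cs ≠ [])).map String.ofList := by
  rw [List.filter_map]
  congr 1
  apply List.filter_congr
  intro cs _
  simp

theorem split_nl (s : String) :
    (PySem.Str.split? s "\n").getD [] = (List.splitOn '\n' s.toList).map String.ofList := by
  have hsep : ("\n" : String).toList = ['\n'] := rfl
  simp [PySem.Str.split?, PySem.Chars.split?, hsep, chars_splitOn_eq]

-- ===== VERDICT (by name: the statement is the Claim_ definition above) =====
theorem split_by_line_jump_spec : Claim_equal_split_by_line_jump := by
  intro array _
  show split_by_line_jump array = split_by_line_jump_alt array
  unfold split_by_line_jump split_by_line_jump_alt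
  rw [outer_foldl_eq, List.nil_append]
  simp only [split_nl]
  have hjoin : (PySem.Str.join "\n" array).toList
      = List.intercalate ['\n'] (array.map String.toList) := by
    simp [PySem.Str.join, PySem.Chars.join]
  rw [hjoin]
  simp only [filter_map_ofList]
  rw [← List.map_flatMap, ← List.filter_flatMap]
  congr 1
  rw [← List.flatMap_map (g := fun cs => List.splitOn '\n' cs) (f := String.toList)]
  cases harr : array.map String.toList with
  | nil => simp [List.intercalate, List.splitOn, List.splitOnP_nil]
  | cons a t =>
      rw [splitOn_intercalate '\n' (a :: t) (by simp)]
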